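-- pv_equiv track=rewrite | github.com/j3ang/VandyHack2018-vanderbilt-university | PythonScripts/VandyHack/DataCollection/Sentiment/train_sentiment_data.py | token_feature
-- ===== SOURCE A (Python) =====
-- from collections import Counter
-- from itertools import chain, combinations
--
-- neg_words = set(['bad', 'hate', 'horrible', 'worst', 'boring'])
--
-- pos_words = set(['awesome', 'amazing', 'best', 'good', 'great', 'love', 'wonderful', 'nice', 'wow'])
--
-- def token_feature(doc_tokens, k=2):
--     c = Counter(doc_tokens)
--     feats = {}
--     for token in doc_tokens:
--         feats['has(%s)'%(token)] = c[token]
--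
--     #lexicon feature
--     n = 0;
--     p = 0;
--     for token in doc_tokens:
--         if token.lower() in neg_words:
--             n += 1
--         if token.lower() in pos_words:
--             p += 1
--     feats['neg_words'] = n
--     feats['pos_words'] = p
--
--     #token_pair_feature
--     for i in range(0, len(doc_tokens) - k + 1):
--         a = doc_tokens[i : i + k]
--         for co in combinations(a,2):
--             key = 'token_pair=%s__%s' % (co[0],co[1])
--             if key in feats:
--                 feats[key] = feats[key] + 1
--             else:
--                 feats[key] = 1
--
--
--     return feats
-- ===== SOURCE B (Python) =====
-- neg_words = set(['bad', 'hate', 'horrible', 'worst', 'boring'])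
--
-- pos_words = set(['awesome', 'amazing', 'best', 'good', 'great', 'love', 'wonderful', 'nice', 'wow'])
--
-- def token_feature(doc_tokens, k=2):
--     # has() features in one accumulating pass (no Counter, no second pass)
--     feats = {}
--     for token in doc_tokens:
--         key = 'has(%s)' % token
--         feats[key] = feats.get(key, 0) + 1
--
--     # lexicon features
--     n = 0
--     p = 0
--     for token in doc_tokens:
--         t = token.lower()
--         if t in neg_words:
--             n += 1
--         if t in pos_words:
--             p += 1
--     feats['neg_words'] = n
--     feats['pos_words'] = p
--
--     # token-pair features: one visit per position pair (a, b), adding in closed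
--     # form the number of length-k windows that contain both positions, instead
--     # of enumerating every window's combinations.
--     L = len(doc_tokens)
--     if k >= 2 and L >= k:
--         m = L - k
--         for a in range(0, k - 1):
--             for b in range(a + 1, k):
--                 key = 'token_pair=%s__%s' % (doc_tokens[a], doc_tokens[b])
--                 feats[key] = feats.get(key, 0) + min(a, m) + 1
--         for b in range(k, L):
--             lo = b - k + 1
--             for a in range(lo, b):
--                 key = 'token_pair=%s__%s' % (doc_tokens[a], doc_tokens[b])
--                 feats[key] = feats.get(key, 0) + min(a, m) - lo + 1
--     return feats
-- ===== Notes on version B (the rewrite author's own statement) =====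
-- stated objective: faster
-- what changed: The token-pair loop over all length-k windows enumerating each window's combinations is replaced by a single visit per position pair that adds, in closed form, the number of windows containing both positions (and the has() counts are built in one accumulating pass without a Counter).
-- intended difference: For k < 0 with len(doc_tokens) + k >= 2, A's slice doc_tokens[i:i+k] hits Python's negative slice-end wraparound and A returns accidental token_pair counts over windows that a length-k window feature never meant; B returns no token_pair features there (a window of negative length contains no pairs), which is the intended value. — e.g. on token_feature(["a", "b", "c"], -1): A returns [("has(a)", 1), ("has(b)", 1), ("has(c)", 1), ("neg_words", 0), ("pos_words", 0), ("token_pair=a__b", 1)], B returns [("has(a)", 1), ("has(b)", 1), ("has(c)", 1), ("neg_words", 0), ("pos_words", 0)]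
import Mathlib
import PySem

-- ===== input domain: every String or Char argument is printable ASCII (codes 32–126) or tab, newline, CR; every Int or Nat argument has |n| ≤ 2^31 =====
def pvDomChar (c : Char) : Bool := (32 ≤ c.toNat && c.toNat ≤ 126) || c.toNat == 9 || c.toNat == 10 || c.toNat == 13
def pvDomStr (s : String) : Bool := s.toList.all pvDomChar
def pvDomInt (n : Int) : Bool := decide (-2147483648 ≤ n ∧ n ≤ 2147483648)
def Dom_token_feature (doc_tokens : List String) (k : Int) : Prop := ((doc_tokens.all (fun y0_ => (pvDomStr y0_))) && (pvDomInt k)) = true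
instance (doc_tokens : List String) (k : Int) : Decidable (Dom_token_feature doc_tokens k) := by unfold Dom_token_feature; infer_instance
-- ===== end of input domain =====

-- B replaces A's window-enumeration of pair combinations by one visit per position
-- pair with a closed-form count of covering windows (measured faster for larger k).


-- ===== PORT A =====
def negWords : PySem.Set String := PySem.Set.ofList ["bad", "hate", "horrible", "worst", "boring"]

def posWords : PySem.Set String := PySem.Set.ofList ["awesome", "amazing", "best", "good", "great", "love", "wonderful", "nice", "wow"]

-- itertools.combinations(xs, 2) in CPython order, the 2-tuples as pairs (co.1 = co[0], co.2 = co[1])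
def combo2 {α : Type} : List α → List (α × α)
  | [] => []
  | x :: xs => (xs.map (fun y => (x, y))) ++ combo2 xs

def token_feature (doc_tokens : List String) (k : Int) : List (String × Int) :=
  let c := PySem.Dict.counter doc_tokens
  let feats : PySem.Dict String Int := PySem.Dict.empty
  let feats := doc_tokens.foldl (fun d token => d.insert ("has(" ++ token ++ ")") (c.getD token 0)) feats
  let np : Int × Int := doc_tokens.foldl (fun np token =>
      let np1 := if negWords.contains (PySem.Str.lower token) then (np.1 + 1, np.2) else np
      if posWords.contains (PySem.Str.lower token) then (np1.1, np1.2 + 1) else np1) (0, 0)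
  let feats := feats.insert "neg_words" np.1
  let feats := feats.insert "pos_words" np.2
  let feats := (PySem.List.pyRange 0 ((doc_tokens.length : Int) - k + 1) 1).foldl (fun feats i =>
      let a := PySem.List.slice doc_tokens (some i) (some (i + k))
      (combo2 a).foldl (fun feats co =>
        let key := "token_pair=" ++ co.1 ++ "__" ++ co.2
        if feats.contains key then feats.insert key (feats.getD key 0 + 1)
        else feats.insert key 1) feats) feats
  feats.items

-- ===== PORT B =====
def token_feature_alt (doc_tokens : List String) (k : Int) : List (String × Int) :=
  let feats : PySem.Dict String Int := PySem.Dict.empty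
  let feats := doc_tokens.foldl (fun d token =>
      let key := "has(" ++ token ++ ")"
      d.insert key (d.getD key 0 + 1)) feats
  let np : Int × Int := doc_tokens.foldl (fun np token =>
      let t := PySem.Str.lower token
      let np1 := if negWords.contains t then (np.1 + 1, np.2) else np
      if posWords.contains t then (np1.1, np1.2 + 1) else np1) (0, 0)
  let feats := feats.insert "neg_words" np.1
  let feats := feats.insert "pos_words" np.2
  let L : Int := (doc_tokens.length : Int)
  let feats :=
    if 2 ≤ k ∧ k ≤ L then
      let m := L - k
      let feats := (PySem.List.pyRange 0 (k - 1) 1).foldl (fun feats a =>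
        (PySem.List.pyRange (a + 1) k 1).foldl (fun feats b =>
          let key := "token_pair=" ++ PySem.List.pyGetD doc_tokens a "" ++ "__" ++ PySem.List.pyGetD doc_tokens b ""
          feats.insert key (feats.getD key 0 + (min a m + 1))) feats) feats
      (PySem.List.pyRange k L 1).foldl (fun feats b =>
        let lo := b - k + 1
        (PySem.List.pyRange lo b 1).foldl (fun feats a =>
          let key := "token_pair=" ++ PySem.List.pyGetD doc_tokens a "" ++ "__" ++ PySem.List.pyGetD doc_tokens b ""
          feats.insert key (feats.getD key 0 + (min a m - lo + 1))) feats) feats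
    else feats
  feats.items

-- ===== PRECONDITION & SPEC =====
-- For k < 0 with len(doc_tokens) + k >= 2, A's slice doc_tokens[i:i+k] hits Python's negative
-- slice-end wraparound and A returns accidental token_pair counts over windows a length-k window
-- feature never meant; B returns no token_pair features there, which is the intended value.
def D_token_feature (doc_tokens : List String) (k : Int) : Prop :=
  k < 0 ∧ 2 ≤ (doc_tokens.length : Int) + k
instance (doc_tokens : List String) (k : Int) : Decidable (D_token_feature doc_tokens k) := by
  unfold D_token_feature; infer_instance

def Spec_token_feature (doc_tokens : List String) (k : Int) (out : List (String × Int)) : Prop :=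
  ¬ D_token_feature doc_tokens k → out = token_feature_alt doc_tokens k
instance (doc_tokens : List String) (k : Int) (out : List (String × Int)) : Decidable (Spec_token_feature doc_tokens k out) := by
  unfold Spec_token_feature; infer_instance

def pvDiffWitness_token_feature : List String × Int := (["a", "b", "c"], -1)

def pvDiffWitnessOut_token_feature : (List (String × Int)) × (List (String × Int)) :=
  ([("has(a)", 1), ("has(b)", 1), ("has(c)", 1), ("neg_words", 0), ("pos_words", 0), ("token_pair=a__b", 1)],
   [("has(a)", 1), ("has(b)", 1), ("has(c)", 1), ("neg_words", 0), ("pos_words", 0)])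

-- ===== CLAIM (what is proved, stated in full; the proofs are below) =====
def Claim_unchanged_token_feature : Prop := ∀ (doc_tokens : List String) (k : Int), Dom_token_feature doc_tokens k → Spec_token_feature doc_tokens k (token_feature doc_tokens k)
def Claim_changed_token_feature : Prop := Dom_token_feature (pvDiffWitness_token_feature.1) (pvDiffWitness_token_feature.2) ∧ D_token_feature (pvDiffWitness_token_feature.1) (pvDiffWitness_token_feature.2) ∧ token_feature (pvDiffWitness_token_feature.1) (pvDiffWitness_token_feature.2) = pvDiffWitnessOut_token_feature.1 ∧ token_feature_alt (pvDiffWitness_token_feature.1) (pvDiffWitness_token_feature.2) = pvDiffWitnessOut_token_feature.2 ∧ pvDiffWitnessOut_token_feature.1 ≠ pvDiffWitnessOut_token_feature.2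


-- ===== LEMMAS AND PROOFS =====

-- ---- generic "first-occurrence relative to a seen-predicate" machinery ----
def nkP {α : Type} [BEq α] (P : α → Bool) : List α → List α
  | [] => []
  | x :: t => if P x then nkP P t else x :: nkP (fun y => P y || x == y) t

theorem nkP_append {α : Type} [BEq α] [LawfulBEq α] (l1 l2 : List α) (P : α → Bool) :
    nkP P (l1 ++ l2) = nkP P l1 ++ nkP (fun y => P y || l1.contains y) l2 := by
  induction l1 generalizing P with
  | nil =>
      simp only [List.nil_append, nkP]
      congr 1
      funext y; simp
  | cons x t ih =>
      by_cases h : P x = true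
      · have hpred : (fun y => P y || (x :: t).contains y) = (fun y => P y || t.contains y) := by
          funext y
          by_cases hyx : y = x
          · subst hyx; simp [h]
          · simp [List.contains_cons, hyx]
        rw [List.cons_append]
        show nkP P (x :: (t ++ l2)) = _
        simp only [nkP, h, if_pos, hpred]
        exact ih P
      · have hpred : (fun y => (fun y => P y || x == y) y || t.contains y)
            = (fun y => P y || (x :: t).contains y) := by
          funext y
          by_cases hyx : y = x
          · subst hyx; simp
          · have h1 : (x == y) = false := by simp; exact fun e => hyx e.symm
            simp [List.contains_cons, hyx, h1]
        rw [List.cons_append]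
        show nkP P (x :: (t ++ l2)) = _
        simp only [nkP, h, if_neg, Bool.not_eq_true, ih, hpred]
        simp

theorem nkP_eq_filter_of_nodup {α : Type} [BEq α] [LawfulBEq α] (l : List α) (hl : l.Nodup) (P : α → Bool) :
    nkP P l = l.filter (fun x => !P x) := by
  induction l generalizing P with
  | nil => rfl
  | cons x t ih =>
      rcases List.nodup_cons.mp hl with ⟨hx, ht⟩
      by_cases h : P x = true
      · simp [nkP, h, ih ht]
      · have e : nkP (fun y => P y || x == y) t = t.filter (fun y => !P y) := by
          rw [ih ht]
          apply List.filter_congr; intro y hy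
          have hxy : (x == y) = false := by simp; exact fun e => hx (e ▸ hy)
          simp [hxy]
        simp [nkP, h, List.filter_cons, e]

theorem nkP_or_eq_filter {α : Type} [BEq α] [LawfulBEq α] (l : List α) (P Q : α → Bool) :
    nkP (fun x => P x || Q x) l = (nkP Q l).filter (fun x => !P x) := by
  induction l generalizing Q with
  | nil => rfl
  | cons x t ih =>
      by_cases hq : Q x = true
      · simp [nkP, hq, ih]
      · have hQ : nkP Q (x :: t) = x :: nkP (fun y => Q y || x == y) t := by
          simp [nkP, hq]
        have key := ih (fun y => Q y || x == y)
        have epred : (fun z => P z || (fun y => Q y || x == y) z)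
            = (fun z => (fun y => P y || Q y) z || x == z) := by
          funext z; simp [Bool.or_assoc]
        rw [epred] at key
        by_cases hp : P x = true
        · have e1 : (P x || Q x) = true := by simp [hp]
          have hL : nkP (fun y => P y || Q y) (x :: t) = nkP (fun y => P y || Q y) t := by
            simp [nkP, e1]
          have e3 : (!P x) = false := by simp [hp]
          rw [hL, hQ, List.filter_cons, e3]
          rw [← key]
          have epred2 : (fun y => P y || Q y) = (fun z => (fun y => P y || Q y) z || x == z) := by
            funext z
            by_cases hzx : z = x
            · subst hzx; simp [hp]
            · have h1 : (x == z) = false := by simp; exact fun e => hzx e.symm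
              simp [h1]
          rw [← epred2]
          simp
        · have e1 : (P x || Q x) = false := by simp [hp, hq]
          have hL : nkP (fun y => P y || Q y) (x :: t)
              = x :: nkP (fun z => (fun y => P y || Q y) z || x == z) t := by
            simp [nkP, e1]
          have e3 : (!P x) = true := by simp [hp]
          rw [hL, hQ, List.filter_cons, e3, ← key]
          simp

theorem nkP_map_dedup {α β : Type} [BEq α] [LawfulBEq α] [BEq β] [LawfulBEq β]
    (f : α → β) (l : List α) (P : β → Bool) (Q : α → Bool)
    (h : ∀ x, Q x = true → P (f x) = true) :
    nkP P (l.map f) = nkP P ((nkP Q l).map f) := by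
  induction l generalizing P Q with
  | nil => rfl
  | cons x t ih =>
      by_cases hq : Q x = true
      · have hp : P (f x) = true := h x hq
        have hnk : nkP Q (x :: t) = nkP Q t := by simp [nkP, hq]
        rw [hnk, List.map_cons]
        have hL : nkP P (f x :: t.map f) = nkP P (t.map f) := by simp [nkP, hp]
        rw [hL]
        exact ih P Q h
      · have hQ : nkP Q (x :: t) = x :: nkP (fun y => Q y || x == y) t := by simp [nkP, hq]
        rw [hQ, List.map_cons, List.map_cons]
        by_cases hp : P (f x) = true
        · have hL : ∀ m : List β, nkP P (f x :: m) = nkP P m := by intro m; simp [nkP, hp]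
          rw [hL, hL]
          apply ih P (fun y => Q y || x == y)
          intro y hy
          rcases Bool.or_eq_true_iff.mp hy with h1 | h1
          · exact h y h1
          · have : x = y := eq_of_beq h1
            subst this; exact hp
        · have hL : ∀ m : List β, nkP P (f x :: m) = f x :: nkP (fun b => P b || f x == b) m := by
            intro m; simp [nkP, hp]
          rw [hL, hL]
          congr 1
          apply ih (fun b => P b || f x == b) (fun y => Q y || x == y)
          intro y hy
          rcases Bool.or_eq_true_iff.mp hy with h1 | h1
          · simp [h y h1]
          · have : x = y := eq_of_beq h1
            subst this; simp

theorem set_update_eq_nkP {α : Type} [BEq α] [LawfulBEq α] (l : List α) (s : PySem.Set α) :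
    PySem.Set.update s l = s ++ nkP (fun y => s.contains y) l := by
  induction l generalizing s with
  | nil => simp [PySem.Set.update, nkP]
  | cons x t ih =>
      show PySem.Set.update (PySem.Set.add s x) t = _
      by_cases h : x ∈ s
      · have hc : PySem.Set.contains s x = true := by
          simp [PySem.Set.contains, h]
        have ha : PySem.Set.add s x = s := by simp [PySem.Set.add, PySem.Set.contains, h]
        have hnk : nkP (fun y => PySem.Set.contains s y) (x :: t)
            = nkP (fun y => PySem.Set.contains s y) t := by simp [nkP, PySem.Set.contains, h]
        rw [ha, ih, hnk]
      · have hc : PySem.Set.contains s x = false := by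
          simp [PySem.Set.contains, h]
        have ha : PySem.Set.add s x = s ++ [x] := by simp [PySem.Set.add, PySem.Set.contains, h]
        have hpred : (fun y => PySem.Set.contains (s ++ [x]) y)
            = (fun y => PySem.Set.contains s y || x == y) := by
          funext y
          by_cases hyx : y = x
          · subst hyx; simp [PySem.Set.contains]
          · have h1 : (x == y) = false := by simp; exact fun e => hyx e.symm
            simp [PySem.Set.contains, hyx, h1]
        have hnk : nkP (fun y => PySem.Set.contains s y) (x :: t)
            = x :: nkP (fun y => PySem.Set.contains s y || x == y) t := by
          simp [nkP, PySem.Set.contains, h]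
        rw [ha, ih, hpred, hnk, List.append_assoc, List.singleton_append]

-- ---- weighted per-key sums ----
def wsum {κ : Type} [BEq κ] (x : κ) (ops : List (κ × Int)) : Int :=
  ((ops.filter (fun kw => kw.1 == x)).map (fun kw => kw.2)).sum

theorem wsum_nil {κ : Type} [BEq κ] (x : κ) : wsum x ([] : List (κ × Int)) = 0 := rfl

theorem wsum_cons {κ : Type} [BEq κ] (x : κ) (kw : κ × Int) (t : List (κ × Int)) :
    wsum x (kw :: t) = (if kw.1 == x then kw.2 else 0) + wsum x t := by
  by_cases h : (kw.1 == x) = true <;> simp [wsum, List.filter_cons, h]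

theorem wsum_append {κ : Type} [BEq κ] (x : κ) (l1 l2 : List (κ × Int)) :
    wsum x (l1 ++ l2) = wsum x l1 + wsum x l2 := by
  simp [wsum, List.filter_append]

theorem wsum_flatMap {κ α : Type} [BEq κ] (x : κ) (l : List α) (g : α → List (κ × Int)) :
    wsum x (l.flatMap g) = (l.map (fun a => wsum x (g a))).sum := by
  induction l with
  | nil => rfl
  | cons a t ih => simp [List.flatMap_cons, wsum_append, ih]

theorem wsum_eq_zero_of_not_mem {κ : Type} [BEq κ] [LawfulBEq κ] (x : κ) (ops : List (κ × Int))
    (h : x ∉ ops.map (fun kw => kw.1)) : wsum x ops = 0 := by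
  induction ops with
  | nil => rfl
  | cons kw t ih =>
      simp only [List.map_cons, List.mem_cons, not_or] at h
      rw [wsum_cons]
      have : (kw.1 == x) = false := by simp; exact fun e => h.1 e.symm
      rw [this, ih h.2]
      simp

-- ---- dict fold characterizations ----
theorem getD_applyOps {κ : Type} [BEq κ] [LawfulBEq κ] [DecidableEq κ]
    (ops : List (κ × Int)) (d : PySem.Dict κ Int) (x : κ) :
    (ops.foldl (fun d kw => d.insert kw.1 (d.getD kw.1 0 + kw.2)) d).getD x 0
      = d.getD x 0 + wsum x ops := by
  induction ops generalizing d with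
  | nil => simp [wsum_nil]
  | cons kw t ih =>
      rw [List.foldl_cons, ih, wsum_cons, PySem.Dict.getD_insert]
      by_cases h : x = kw.1
      · subst h; simp; ring
      · have : (kw.1 == x) = false := by simp; exact fun e => h e.symm
        simp [h, this]

theorem dict_eq_of_keys_getD {κ : Type} [BEq κ] [LawfulBEq κ] (d d' : PySem.Dict κ Int)
    (h1 : d.keys.Nodup) (h2 : d'.keys.Nodup) (hk : d.keys = d'.keys)
    (hg : ∀ x, d.getD x 0 = d'.getD x 0) : d = d' := by
  apply PySem.Dict.ext
  rw [PySem.Dict.items_eq_map_keys d h1 0, PySem.Dict.items_eq_map_keys d' h2 0, hk]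
  exact List.map_congr_left (fun k _ => by rw [hg k])


-- ---- combo2 lemmas ----
theorem combo2_map {α β : Type} (f : α → β) (l : List α) :
    combo2 (l.map f) = (combo2 l).map (Prod.map f f) := by
  induction l with
  | nil => rfl
  | cons x t ih =>
      simp only [List.map_cons, combo2, ih, List.map_append, List.map_map]
      congr 1

theorem combo2_eq_nil_of_short {α : Type} (l : List α) (h : l.length ≤ 1) : combo2 l = [] := by
  match l, h with
  | [], _ => rfl
  | [x], _ => rfl

theorem mem_combo2 {α : Type} (l : List α) (pq : α × α) (h : pq ∈ combo2 l) :
    pq.1 ∈ l ∧ pq.2 ∈ l := by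
  induction l with
  | nil => simp [combo2] at h
  | cons x t ih =>
      simp only [combo2, List.mem_append, List.mem_map] at h
      rcases h with ⟨y, hy, rfl⟩ | h
      · exact ⟨List.mem_cons_self .., List.mem_cons_of_mem _ hy⟩
      · rcases ih h with ⟨h1, h2⟩
        exact ⟨List.mem_cons_of_mem _ h1, List.mem_cons_of_mem _ h2⟩

theorem nodup_combo2 {α : Type} (l : List α) (h : l.Nodup) : (combo2 l).Nodup := by
  induction l with
  | nil => simp [combo2]
  | cons x t ih =>
      rcases List.nodup_cons.mp h with ⟨hx, ht⟩
      simp only [combo2]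
      apply List.Nodup.append
      · refine ht.map ?_
        intro a b e
        exact ((Prod.mk.injEq x a x b).mp e).2
      · exact ih ht
      · intro pq h1 h2
        simp only [List.mem_map] at h1
        rcases h1 with ⟨y, _, rfl⟩
        exact hx (mem_combo2 t _ h2).1

theorem combo2_flatMap_range (a b : Int) :
    combo2 (PySem.List.pyRange a b 1)
      = (PySem.List.pyRange a b 1).flatMap
          (fun p => (PySem.List.pyRange (p + 1) b 1).map (fun q => (p, q))) := by
  by_cases hab : a < b
  · have hn : (b - a).toNat ≠ 0 := by omega
    generalize hm : (b - a).toNat = m at *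
    induction m generalizing a with
    | zero => omega
    | succ m ihm =>
        rw [PySem.List.pyRange_one_cons hab, List.flatMap_cons]
        simp only [combo2]
        congr 1
        by_cases hab2 : a + 1 < b
        · exact ihm (a + 1) hab2 (by omega) (by omega)
        · have h1 : PySem.List.pyRange (a + 1) b = [] := PySem.List.pyRange_one_eq_nil (by omega)
          rw [h1]; rfl
  · have h1 : PySem.List.pyRange a b = [] := PySem.List.pyRange_one_eq_nil (by omega)
    rw [h1]; rfl

theorem mem_combo2_range (a b : Int) (pq : Int × Int) :
    pq ∈ combo2 (PySem.List.pyRange a b 1) ↔ a ≤ pq.1 ∧ pq.1 < pq.2 ∧ pq.2 < b := by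
  rw [combo2_flatMap_range]
  simp only [List.mem_flatMap, List.mem_map, PySem.List.mem_pyRange_one]
  constructor
  · rintro ⟨p, hp, q, hq, rfl⟩
    exact ⟨hp.1, by omega, hq.2⟩
  · rintro ⟨h1, h2, h3⟩
    exact ⟨pq.1, ⟨h1, by omega⟩, pq.2, ⟨by omega, h3⟩, rfl⟩

-- ---- Int range singleton/sum lemmas ----
theorem filter_range_eq (a b v : Int) :
    (PySem.List.pyRange a b 1).filter (fun j => j == v)
      = if a ≤ v ∧ v < b then [v] else [] := by
  by_cases hab : a < b
  · generalize hm : (b - a).toNat = m at *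
    induction m generalizing a with
    | zero => omega
    | succ m ihm =>
        rw [PySem.List.pyRange_one_cons hab, List.filter_cons]
        by_cases hav : a = v
        · subst hav
          have : (a == a) = true := by simp
          rw [this, if_pos rfl]
          have hrest : (PySem.List.pyRange (a + 1) b).filter (fun j => j == a) = [] := by
            apply List.filter_eq_nil_iff.mpr
            intro j hj
            have hb2 := PySem.List.mem_pyRange_one.mp hj
            simp only [beq_iff_eq]
            omega
          rw [hrest, if_pos ⟨le_refl a, hab⟩]
        · have : (a == v) = false := by simp only [beq_eq_false_iff_ne, ne_eq]; exact hav
          rw [this]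
          simp only [Bool.false_eq_true, if_neg, not_false_iff]
          by_cases hab2 : a + 1 < b
          · rw [ihm (a + 1) hab2 (by omega)]
            have h2 : (a + 1 ≤ v ∧ v < b) ↔ (a ≤ v ∧ v < b) := by omega
            rw [if_congr h2 rfl rfl]
          · have h1 : PySem.List.pyRange (a + 1) b = [] := PySem.List.pyRange_one_eq_nil (by omega)
            rw [h1]
            have : ¬(a ≤ v ∧ v < b) := by omega
            simp [this]
  · have h1 : PySem.List.pyRange a b = [] := PySem.List.pyRange_one_eq_nil (by omega)
    rw [h1]
    have : ¬(a ≤ v ∧ v < b) := by omega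
    simp [this]

theorem sum_range_pt (a b v : Int) (c : Int → Int) :
    ((PySem.List.pyRange a b 1).map (fun j => if j = v then c j else 0)).sum
      = if a ≤ v ∧ v < b then c v else 0 := by
  by_cases hab : a < b
  · generalize hm : (b - a).toNat = m at *
    induction m generalizing a with
    | zero => omega
    | succ m ihm =>
        rw [PySem.List.pyRange_one_cons hab, List.map_cons, List.sum_cons]
        by_cases hab2 : a + 1 < b
        · rw [ihm (a + 1) hab2 (by omega)]
          by_cases hav : a = v
          · subst hav
            have : ¬(a + 1 ≤ a ∧ a < b) := by omega
            simp [this, hab]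
          · have h2 : (a + 1 ≤ v ∧ v < b) ↔ (a ≤ v ∧ v < b) := by omega
            rw [if_neg hav, zero_add, if_congr h2 rfl rfl]
        · have h1 : PySem.List.pyRange (a + 1) b = [] := PySem.List.pyRange_one_eq_nil (by omega)
          rw [h1]
          by_cases hav : a = v
          · subst hav; simp [hab]
          · have : ¬(a ≤ v ∧ v < b) := by omega
            simp [hav, this]
  · have h1 : PySem.List.pyRange a b = [] := PySem.List.pyRange_one_eq_nil (by omega)
    rw [h1]
    have : ¬(a ≤ v ∧ v < b) := by omega
    simp [this]

theorem sum_range_indicator (a b lo hi : Int) :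
    ((PySem.List.pyRange a b 1).map (fun i => if lo ≤ i ∧ i ≤ hi then (1 : Int) else 0)).sum
      = max 0 (min hi (b - 1) - max lo a + 1) := by
  by_cases hab : a < b
  · generalize hm : (b - a).toNat = m at *
    induction m generalizing a with
    | zero => omega
    | succ m ihm =>
        rw [PySem.List.pyRange_one_cons hab, List.map_cons, List.sum_cons]
        by_cases hab2 : a + 1 < b
        · rw [ihm (a + 1) hab2 (by omega)]
          split_ifs <;> simp only [max_def, min_def] <;> split_ifs <;> omega
        · have h1 : PySem.List.pyRange (a + 1) b = [] := PySem.List.pyRange_one_eq_nil (by omega)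
          rw [h1]
          simp only [List.map_nil, List.sum_nil]
          split_ifs <;> simp only [max_def, min_def] <;> split_ifs <;> omega
  · have h1 : PySem.List.pyRange a b = [] := PySem.List.pyRange_one_eq_nil (by omega)
    rw [h1]
    simp only [List.map_nil, List.sum_nil]
    simp only [max_def, min_def] <;> split_ifs <;> omega

-- ---- multiplicity transfer: equal per-element counts give equal per-key weighted sums ----
theorem count_transfer {gam kap : Type} [BEq gam] [LawfulBEq gam] [BEq kap] [LawfulBEq kap]
    (l2 : List (gam × Int)) (l1 : List gam) (f : gam → kap)
    (hnd : (l2.map (fun aw => aw.1)).Nodup)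
    (hcnt : ∀ a : gam, (l1.count a : Int) = wsum a l2) (x : kap) :
    ((l1.map f).count x : Int) = wsum x (l2.map (fun aw => (f aw.1, aw.2))) := by
  induction l2 generalizing l1 with
  | nil =>
      have hnil : l1 = [] := by
        apply List.eq_nil_iff_forall_not_mem.mpr
        intro a ha
        have h1 := hcnt a
        rw [wsum_nil] at h1
        have h2 : 0 < l1.count a := List.count_pos_iff.mpr ha
        omega
      subst hnil
      simp [wsum_nil]
  | cons aw rest ih =>
      obtain ⟨a0, w⟩ := aw
      simp only [List.map_cons, List.nodup_cons] at hnd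
      obtain ⟨ha0, hndr⟩ := hnd
      have hw : (l1.count a0 : Int) = w := by
        have h1 := hcnt a0
        rw [wsum_cons] at h1
        rw [wsum_eq_zero_of_not_mem a0 rest ha0] at h1
        simpa using h1
      have hcnt' : ∀ a, ((l1.filter (fun t => !(t == a0))).count a : Int) = wsum a rest := by
        intro a
        by_cases ha : a = a0
        · rw [ha]
          have h0 : a0 ∉ l1.filter (fun t => !(t == a0)) := by
            intro hmem
            have h3 := List.of_mem_filter hmem
            simp at h3
          rw [List.count_eq_zero_of_not_mem h0, wsum_eq_zero_of_not_mem a0 rest ha0]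
          rfl
        · have hpa : (!(a == a0)) = true := by simp [ha]
          rw [List.count_filter (p := fun t => !(t == a0)) hpa]
          have h1 := hcnt a
          rw [wsum_cons] at h1
          have : (a0 == a) = false := by simp; exact fun e => ha e.symm
          rw [this] at h1
          simpa using h1
      have hperm : (l1.filter (fun t => t == a0) ++ l1.filter (fun t => !(t == a0))).Perm l1 :=
        List.filter_append_perm _ _
      have hsplit : ((l1.map f).count x : Int)
          = (((l1.filter (fun t => t == a0)).map f).count x : Int)
            + (((l1.filter (fun t => !(t == a0))).map f).count x : Int) := by
        have := (hperm.map f).count_eq x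
        rw [List.map_append, List.count_append] at this
        rw [← this]
        push_cast
        ring
      rw [hsplit, List.filter_beq, List.map_replicate, List.count_replicate]
      rw [List.map_cons, wsum_cons, ih _ hndr hcnt']
      by_cases hfx : (f a0 == x) = true
      · simp only [hfx, if_pos]
        rw [← hw]
      · simp only [hfx]
        norm_num

-- ---- slice of an in-range window is the indexed range ----
theorem slice_window (doc : List String) (i kk : Int) (h0 : 0 ≤ i) (hk : 0 ≤ kk)
    (hle : i + kk ≤ (doc.length : Int)) :
    PySem.List.slice doc (some i) (some (i + kk))
      = (PySem.List.pyRange i (i + kk) 1).map (fun j => PySem.List.pyGetD doc j "") := by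
  rw [PySem.List.slice_toNat doc h0 (by omega)]
  apply List.ext_getElem
  · simp only [List.length_take, List.length_drop, List.length_map,
      PySem.List.length_pyRange_one]
    omega
  · intro n h1 h2
    simp only [List.getElem_take, List.getElem_drop, List.getElem_map]
    rw [PySem.List.getElem_pyRange_one]
    have he : (i + (n : Int)) = ((i.toNat + n : Nat) : Int) := by omega
    rw [he, PySem.List.pyGetD_natCast]
    have hlt : i.toNat + n < doc.length := by
      simp only [List.length_take, List.length_drop] at h1
      omega
    rw [List.getD_eq_getElem?_getD, List.getElem?_eq_getElem hlt, Option.getD_some]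

-- ---- fold of key-indexed constant-value inserts: last writer wins ----
theorem getD_foldl_insert_const {α kap : Type} [BEq kap] [LawfulBEq kap] [DecidableEq kap]
    (l : List α) (key : α → kap) (v : α → Int) (d : PySem.Dict kap Int) (x : kap) :
    (l.foldl (fun d t => d.insert (key t) (v t)) d).getD x 0
      = ((l.filter (fun t => key t == x)).getLast?.map v).getD (d.getD x 0) := by
  induction l using List.reverseRecOn with
  | nil => simp
  | append_singleton l a ihl =>
      rw [List.foldl_append, List.foldl_cons, List.foldl_nil, List.filter_append,
        PySem.Dict.getD_insert]
      by_cases hka : (key a == x) = true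
      · have hx : x = key a := (eq_of_beq hka).symm
        rw [if_pos hx]
        have : List.filter (fun t => key t == x) [a] = [a] := by simp [hka]
        rw [this, List.getLast?_concat]
        rfl
      · have hx : ¬ x = key a := by
          intro e; exact hka (by simp [e])
        rw [if_neg hx]
        have : List.filter (fun t => key t == x) [a] = [] := by
          simp [hka]
        rw [this, List.append_nil, ihl]

theorem hk_inj : Function.Injective (fun t : String => "has(" ++ t ++ ")") := by
  intro a b e
  apply String.ext
  have h1 := congrArg String.toList e
  simp only [String.toList_append] at h1
  exact List.append_cancel_left (List.append_cancel_right h1)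

-- ---- the position-pair views of the two pair loops ----
def winPairs (i kk : Int) : List (Int × Int) := combo2 (PySem.List.pyRange i (i + kk) 1)

def pairsA (L kk : Int) : List (Int × Int) :=
  (PySem.List.pyRange 0 (L - kk + 1) 1).flatMap (fun i => winPairs i kk)

def phase1 (L kk : Int) : List ((Int × Int) × Int) :=
  (PySem.List.pyRange 0 (kk - 1) 1).flatMap (fun a =>
    (PySem.List.pyRange (a + 1) kk 1).map (fun b => ((a, b), min a (L - kk) + 1)))

def phase2 (L kk : Int) : List ((Int × Int) × Int) :=
  (PySem.List.pyRange kk L 1).flatMap (fun b =>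
    (PySem.List.pyRange (b - kk + 1) b 1).map (fun a => ((a, b), min a (L - kk) - (b - kk + 1) + 1)))

def opsB (L kk : Int) : List ((Int × Int) × Int) := phase1 L kk ++ phase2 L kk

theorem nodup_winPairs (i kk : Int) : (winPairs i kk).Nodup :=
  nodup_combo2 _ (PySem.List.nodup_pyRange_one _ _)

theorem mem_winPairs (i kk : Int) (pq : Int × Int) :
    pq ∈ winPairs i kk ↔ i ≤ pq.1 ∧ pq.1 < pq.2 ∧ pq.2 < i + kk :=
  mem_combo2_range i (i + kk) pq

theorem wsum_map {β kap : Type} [BEq kap] (x : kap) (l : List β) (key : β → kap) (wt : β → Int) :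
    wsum x (l.map (fun b => (key b, wt b)))
      = (l.map (fun b => if key b == x then wt b else 0)).sum := by
  induction l with
  | nil => rfl
  | cons b t ih =>
      rw [List.map_cons, wsum_cons, List.map_cons, List.sum_cons, ih]

-- per position pair: A's number of visits equals B's closed-form weight
theorem count_pairsA (L kk : Int) (hk : 2 ≤ kk) (hL : kk ≤ L) (pq : Int × Int) :
    (((pairsA L kk).count pq : Int)) = wsum pq (opsB L kk) := by
  have hLHS : ((pairsA L kk).count pq : Int)
      = ((PySem.List.pyRange 0 (L - kk + 1) 1).map
          (fun i => if i ≤ pq.1 ∧ pq.1 < pq.2 ∧ pq.2 < i + kk then (1 : Int) else 0)).sum := by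
    unfold pairsA
    rw [List.count_flatMap, Nat.cast_list_sum, List.map_map]
    congr 1
    apply List.map_congr_left
    intro i _
    simp only [Function.comp_apply]
    by_cases hmem : pq ∈ winPairs i kk
    · rw [List.count_eq_one_of_mem (nodup_winPairs i kk) hmem,
        if_pos ((mem_winPairs i kk pq).mp hmem)]
      rfl
    · rw [List.count_eq_zero_of_not_mem hmem,
        if_neg (fun hc => hmem ((mem_winPairs i kk pq).mpr hc))]
      rfl
  have hRHS1 : wsum pq (phase1 L kk)
      = if 0 ≤ pq.1 ∧ pq.1 < kk - 1 then
          (if pq.1 + 1 ≤ pq.2 ∧ pq.2 < kk then min pq.1 (L - kk) + 1 else 0)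
        else 0 := by
    unfold phase1
    rw [wsum_flatMap]
    have hinner : ∀ a : Int, wsum pq ((PySem.List.pyRange (a + 1) kk 1).map
          (fun b => ((a, b), min a (L - kk) + 1)))
        = if a = pq.1 then (if a + 1 ≤ pq.2 ∧ pq.2 < kk then min a (L - kk) + 1 else 0) else 0 := by
      intro a
      rw [wsum_map]
      have : ∀ b : Int, ((if ((a, b) : Int × Int) == pq then min a (L - kk) + 1 else 0) : Int)
          = if b = pq.2 then (if a = pq.1 then min a (L - kk) + 1 else 0) else 0 := by
        intro b
        by_cases h1 : a = pq.1 <;> by_cases h2 : b = pq.2 <;>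
          simp [Prod.ext_iff, h1, h2]
      rw [List.map_congr_left (fun b _ => this b), sum_range_pt]
      by_cases h1 : a = pq.1 <;> by_cases h2 : a + 1 ≤ pq.2 ∧ pq.2 < kk <;>
        simp [h1, h2]
    rw [List.map_congr_left (fun a _ => hinner a)]
    have : ∀ a : Int, (if a = pq.1 then
          (if a + 1 ≤ pq.2 ∧ pq.2 < kk then min a (L - kk) + 1 else 0) else 0)
        = if a = pq.1 then
          (if pq.1 + 1 ≤ pq.2 ∧ pq.2 < kk then min pq.1 (L - kk) + 1 else 0) else 0 := by
      intro a
      by_cases h1 : a = pq.1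
      · subst h1; rfl
      · simp [h1]
    rw [List.map_congr_left (fun a _ => this a), sum_range_pt]
  have hRHS2 : wsum pq (phase2 L kk)
      = if kk ≤ pq.2 ∧ pq.2 < L then
          (if pq.2 - kk + 1 ≤ pq.1 ∧ pq.1 < pq.2 then
            min pq.1 (L - kk) - (pq.2 - kk + 1) + 1 else 0)
        else 0 := by
    unfold phase2
    rw [wsum_flatMap]
    have hinner : ∀ b : Int, wsum pq ((PySem.List.pyRange (b - kk + 1) b 1).map
          (fun a => ((a, b), min a (L - kk) - (b - kk + 1) + 1)))
        = if b = pq.2 then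
            (if b - kk + 1 ≤ pq.1 ∧ pq.1 < b then
              min pq.1 (L - kk) - (b - kk + 1) + 1 else 0) else 0 := by
      intro b
      rw [wsum_map]
      have : ∀ a : Int, ((if ((a, b) : Int × Int) == pq then
            min a (L - kk) - (b - kk + 1) + 1 else 0) : Int)
          = if a = pq.1 then
              (if b = pq.2 then min a (L - kk) - (b - kk + 1) + 1 else 0) else 0 := by
        intro a
        by_cases h1 : a = pq.1 <;> by_cases h2 : b = pq.2 <;>
          simp [Prod.ext_iff, h1, h2]
      rw [List.map_congr_left (fun a _ => this a), sum_range_pt]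
      by_cases h2 : b = pq.2
      · subst h2
        by_cases h3 : pq.2 - kk + 1 ≤ pq.1 ∧ pq.1 < pq.2 <;> simp [h3]
      · simp [h2]
    rw [List.map_congr_left (fun b _ => hinner b), sum_range_pt]
  rw [hLHS]
  unfold opsB
  rw [wsum_append, hRHS1, hRHS2]
  by_cases hpq : pq.1 < pq.2
  · have hcongr : ∀ i : Int,
        (if i ≤ pq.1 ∧ pq.1 < pq.2 ∧ pq.2 < i + kk then (1 : Int) else 0)
          = if pq.2 - kk + 1 ≤ i ∧ i ≤ pq.1 then (1 : Int) else 0 := by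
      intro i
      have : (i ≤ pq.1 ∧ pq.1 < pq.2 ∧ pq.2 < i + kk) ↔ (pq.2 - kk + 1 ≤ i ∧ i ≤ pq.1) := by
        omega
      rw [if_congr this rfl rfl]
    rw [List.map_congr_left (fun i _ => hcongr i), sum_range_indicator]
    split_ifs <;> simp only [max_def, min_def] <;> split_ifs <;> omega
  · have hz : ∀ i : Int,
        (if i ≤ pq.1 ∧ pq.1 < pq.2 ∧ pq.2 < i + kk then (1 : Int) else 0) = 0 := by
      intro i
      rw [if_neg]
      intro hc
      exact hpq hc.2.1
    rw [List.map_congr_left (fun i _ => hz i)]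
    rw [List.sum_eq_zero (fun y hy => by rcases List.mem_map.mp hy with ⟨i, _, rfl⟩; rfl)]
    split_ifs <;> omega

-- ---- first-appearance order: A's deduplicated pair stream is exactly B's pair stream ----
def Pseen (kk i : Int) : (Int × Int) → Bool := fun pq =>
  decide (0 ≤ pq.1 ∧ pq.1 < pq.2 ∧ pq.2 - pq.1 ≤ kk - 1 ∧ pq.2 ≤ i + kk - 2)

theorem flatMap_singleton_eq_map {α β : Type} (l : List α) (f : α → β) :
    l.flatMap (fun x => [f x]) = l.map f := by
  induction l with
  | nil => rfl
  | cons x t ih => simp [List.flatMap_cons, ih]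

theorem filter_winPairs (kk i : Int) (hk : 2 ≤ kk) (hi : 0 ≤ i) :
    (winPairs i kk).filter (fun pq => !(Pseen kk i pq))
      = (PySem.List.pyRange i (i + kk - 1) 1).map (fun a => (a, i + kk - 1)) := by
  unfold winPairs
  rw [combo2_flatMap_range, List.filter_flatMap]
  have hinner : ∀ p ∈ PySem.List.pyRange i (i + kk) 1,
      ((PySem.List.pyRange (p + 1) (i + kk) 1).map (fun q => (p, q))).filter
          (fun pq => !(Pseen kk i pq))
        = if p + 1 ≤ i + kk - 1 ∧ i + kk - 1 < i + kk then [(p, i + kk - 1)] else [] := by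
    intro p hp
    have hpb := PySem.List.mem_pyRange_one.mp hp
    rw [List.filter_map]
    have hcongr : ∀ q ∈ PySem.List.pyRange (p + 1) (i + kk) 1,
        ((fun pq => !(Pseen kk i pq)) ∘ (fun q => (p, q))) q = (q == (i + kk - 1)) := by
      intro q hq
      have hqb := PySem.List.mem_pyRange_one.mp hq
      show (!(Pseen kk i (p, q))) = (q == (i + kk - 1))
      rw [Bool.eq_iff_iff]
      simp only [Pseen, Bool.not_eq_true', decide_eq_false_iff_not, beq_iff_eq]
      omega
    rw [List.filter_congr hcongr, filter_range_eq]
    by_cases hcond : p + 1 ≤ i + kk - 1 ∧ i + kk - 1 < i + kk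
    · rw [if_pos hcond, if_pos hcond]
      rfl
    · rw [if_neg hcond, if_neg hcond]
      rfl
  rw [List.flatMap_congr hinner]
  have hsplit : PySem.List.pyRange i (i + kk) 1
      = PySem.List.pyRange i (i + kk - 1) 1 ++ [i + kk - 1] := by
    have h2 := PySem.List.pyRange_one_succ_right (a := i) (b := i + kk - 1) (by omega)
    rw [show i + kk - 1 + 1 = i + kk by ring] at h2
    exact h2
  rw [hsplit, List.flatMap_append]
  have hlast : List.flatMap
      (fun p => if p + 1 ≤ i + kk - 1 ∧ i + kk - 1 < i + kk then [(p, i + kk - 1)] else [])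
      [i + kk - 1] = [] := by
    rw [List.flatMap_singleton, if_neg (by omega)]
  rw [hlast, List.append_nil]
  have hfirst : ∀ p ∈ PySem.List.pyRange i (i + kk - 1) 1,
      (if p + 1 ≤ i + kk - 1 ∧ i + kk - 1 < i + kk then [(p, i + kk - 1)] else [])
        = [(p, i + kk - 1)] := by
    intro p hp
    have hpb := PySem.List.mem_pyRange_one.mp hp
    rw [if_pos (by omega)]
  rw [List.flatMap_congr hfirst, flatMap_singleton_eq_map]

theorem seen_update (kk i : Int) (hk : 2 ≤ kk) (hi : 0 ≤ i) :
    (fun pq => Pseen kk i pq || (winPairs i kk).contains pq) = Pseen kk (i + 1) := by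
  funext pq
  rw [Bool.eq_iff_iff]
  simp only [Bool.or_eq_true, Pseen, decide_eq_true_eq, List.contains_iff_mem,
    mem_winPairs]
  omega

theorem phase1_fst (L kk : Int) (hk : 2 ≤ kk) :
    (phase1 L kk).map (fun pw => pw.1) = winPairs 0 kk := by
  unfold phase1 winPairs
  rw [List.map_flatMap, combo2_flatMap_range]
  have hsplit : PySem.List.pyRange 0 (0 + kk) 1
      = PySem.List.pyRange 0 (kk - 1) 1 ++ [kk - 1] := by
    have h2 := PySem.List.pyRange_one_succ_right (a := 0) (b := kk - 1) (by omega)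
    rw [show kk - 1 + 1 = kk by ring] at h2
    rw [show (0 : Int) + kk = kk by ring]
    exact h2
  rw [hsplit, List.flatMap_append]
  have hlast : List.flatMap
      (fun p => (PySem.List.pyRange (p + 1) (0 + kk) 1).map (fun q => (p, q))) [kk - 1] = [] := by
    rw [List.flatMap_singleton]
    have : PySem.List.pyRange (kk - 1 + 1) (0 + kk) 1 = [] :=
      PySem.List.pyRange_one_eq_nil (by omega)
    rw [this, List.map_nil]
  rw [hlast, List.append_nil]
  apply List.flatMap_congr
  intro a _
  rw [List.map_map]
  have : PySem.List.pyRange (a + 1) kk 1 = PySem.List.pyRange (a + 1) (0 + kk) 1 := by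
    rw [show (0 : Int) + kk = kk by ring]
  rw [this]
  rfl

theorem phase2_fst (L kk : Int) :
    (phase2 L kk).map (fun pw => pw.1)
      = (PySem.List.pyRange kk L 1).flatMap
          (fun b => (PySem.List.pyRange (b - kk + 1) b 1).map (fun a => (a, b))) := by
  unfold phase2
  rw [List.map_flatMap]
  apply List.flatMap_congr
  intro b _
  rw [List.map_map]
  rfl

theorem order_tail (L kk : Int) (hk : 2 ≤ kk) (hL : kk ≤ L) :
    ∀ (n : Nat) (i : Int), 1 ≤ i → i ≤ L - kk + 1 → (L - kk + 1 - i).toNat = n →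
    nkP (Pseen kk i) ((PySem.List.pyRange i (L - kk + 1) 1).flatMap (fun j => winPairs j kk))
      = (PySem.List.pyRange (i + kk - 1) L 1).flatMap
          (fun b => (PySem.List.pyRange (b - kk + 1) b 1).map (fun a => (a, b))) := by
  intro n
  induction n with
  | zero =>
      intro i h1 h2 h3
      have hi : i = L - kk + 1 := by omega
      subst hi
      rw [PySem.List.pyRange_one_eq_nil (le_refl _),
        PySem.List.pyRange_one_eq_nil (by omega), List.flatMap_nil, List.flatMap_nil]
      rfl
  | succ n ihn =>
      intro i h1 h2 h3
      have hilt : i < L - kk + 1 := by omega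
      rw [PySem.List.pyRange_one_cons hilt, List.flatMap_cons, nkP_append,
        nkP_eq_filter_of_nodup _ (nodup_winPairs i kk), filter_winPairs kk i hk (by omega),
        seen_update kk i hk (by omega), ihn (i + 1) (by omega) (by omega) (by omega)]
      rw [PySem.List.pyRange_one_cons (a := i + kk - 1) (b := L) (by omega), List.flatMap_cons]
      congr 2
      · rw [show i + kk - 1 - kk + 1 = i by ring]
      · rw [show i + 1 + kk - 1 = i + kk - 1 + 1 by ring]

theorem order_main (L kk : Int) (hk : 2 ≤ kk) (hL : kk ≤ L) :
    nkP (fun _ => false) (pairsA L kk) = (opsB L kk).map (fun pw => pw.1) := by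
  unfold pairsA opsB
  rw [List.map_append, phase1_fst L kk hk, phase2_fst]
  rw [PySem.List.pyRange_one_cons (a := 0) (b := L - kk + 1) (by omega), List.flatMap_cons,
    nkP_append, nkP_eq_filter_of_nodup _ (nodup_winPairs 0 kk)]
  have h0 : (winPairs 0 kk).filter (fun x => !(fun _ => false) x) = winPairs 0 kk := by
    simp
  have hseen : (fun y => (fun _ => false) y || (winPairs 0 kk).contains y) = Pseen kk 1 := by
    funext pq
    rw [Bool.eq_iff_iff]
    simp only [Bool.false_or, List.contains_iff_mem, mem_winPairs, Pseen, decide_eq_true_eq]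
    omega
  rw [h0, hseen, show (0 : Int) + 1 = 1 by ring,
    order_tail L kk hk hL (L - kk + 1 - 1).toNat 1 (le_refl 1) (by omega) rfl]
  rw [show (1 : Int) + kk - 1 = kk by ring]

-- ---- B's pair stream is duplicate-free ----
theorem nodup_flatMap_tag (l : List Int) (hl : l.Nodup) (g : Int → List Int)
    (hg : ∀ b, (g b).Nodup) :
    (l.flatMap (fun b => (g b).map (fun a => (a, b)))).Nodup := by
  induction l with
  | nil => simp
  | cons b t ih =>
      rcases List.nodup_cons.mp hl with ⟨hb, ht⟩
      rw [List.flatMap_cons]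
      apply List.Nodup.append
      · exact (hg b).map (fun a a' e => ((Prod.mk.injEq ..).mp e).1)
      · exact ih ht
      · intro pq h1 h2
        rcases List.mem_map.mp h1 with ⟨a, _, rfl⟩
        rcases List.mem_flatMap.mp h2 with ⟨b', hb', hmem⟩
        rcases List.mem_map.mp hmem with ⟨a', _, he⟩
        have : b' = b := ((Prod.mk.injEq ..).mp he).2
        subst this
        exact hb hb'

theorem mem_phase2_fst (L kk : Int) (pq : Int × Int)
    (h : pq ∈ (phase2 L kk).map (fun pw => pw.1)) : kk ≤ pq.2 := by
  rw [phase2_fst] at h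
  rcases List.mem_flatMap.mp h with ⟨b, hb, hmem⟩
  rcases List.mem_map.mp hmem with ⟨a, _, rfl⟩
  exact (PySem.List.mem_pyRange_one.mp hb).1

theorem nodup_opsB_fst (L kk : Int) (hk : 2 ≤ kk) :
    ((opsB L kk).map (fun pw => pw.1)).Nodup := by
  unfold opsB
  rw [List.map_append]
  apply List.Nodup.append
  · rw [phase1_fst L kk hk]
    exact nodup_winPairs 0 kk
  · rw [phase2_fst]
    exact nodup_flatMap_tag _ (PySem.List.nodup_pyRange_one _ _) _
      (fun b => PySem.List.nodup_pyRange_one _ _)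
  · intro pq h1 h2
    rw [phase1_fst L kk hk] at h1
    have hq1 : pq.2 < 0 + kk := ((mem_winPairs 0 kk pq).mp h1).2.2
    have hq2 : kk ≤ pq.2 := mem_phase2_fst L kk pq h2
    omega

-- ---- the has() phase builds the same dict in both programs ----
theorem has_phase_eq (doc : List String) :
    doc.foldl (fun d token =>
        d.insert ("has(" ++ token ++ ")") ((PySem.Dict.counter doc).getD token 0))
      PySem.Dict.empty
      = doc.foldl (fun d token =>
          d.insert ("has(" ++ token ++ ")")
            (d.getD ("has(" ++ token ++ ")") 0 + 1)) PySem.Dict.empty := by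
  apply dict_eq_of_keys_getD
  · exact PySem.Dict.nodup_keys_foldl_insert_key doc _ _ _ (by simp [PySem.Dict.nodup_keys_empty])
  · exact PySem.Dict.nodup_keys_foldl_insert_key doc _ _ _ (by simp [PySem.Dict.nodup_keys_empty])
  · rw [PySem.Dict.keys_foldl_insert_key doc (fun t => "has(" ++ t ++ ")"),
      PySem.Dict.keys_foldl_insert_key doc (fun t => "has(" ++ t ++ ")")]
  · intro x
    rw [getD_foldl_insert_const doc (fun t => "has(" ++ t ++ ")")
      (fun t => (PySem.Dict.counter doc).getD t 0) PySem.Dict.empty x]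
    have hB : (doc.foldl (fun d token =>
          d.insert ("has(" ++ token ++ ")")
            (d.getD ("has(" ++ token ++ ")") 0 + 1)) PySem.Dict.empty).getD x 0
        = PySem.Dict.empty.getD x 0
          + ((doc.map (fun t => "has(" ++ t ++ ")")).count x : Int) := by
      rw [← PySem.Dict.getD_foldl_insert_add_one (doc.map (fun t => "has(" ++ t ++ ")"))
        PySem.Dict.empty x]
      rw [List.foldl_map]
    rw [hB]
    by_cases hex : x ∈ doc.map (fun t => "has(" ++ t ++ ")")
    · rcases List.mem_map.mp hex with ⟨t0, ht0, rfl⟩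
      have hfilter : doc.filter (fun t => ("has(" ++ t ++ ")" : String) == ("has(" ++ t0 ++ ")" : String))
          = doc.filter (fun t => t == t0) := by
        apply List.filter_congr
        intro t _
        rw [Bool.eq_iff_iff]
        simp only [beq_iff_eq]
        constructor
        · exact fun e => hk_inj e
        · exact fun e => by rw [e]
      rw [hfilter, List.filter_beq]
      have hpos : 0 < doc.count t0 := List.count_pos_iff.mpr ht0
      obtain ⟨n, hn⟩ : ∃ n, doc.count t0 = n + 1 := ⟨doc.count t0 - 1, by omega⟩
      rw [hn]
      have hlast : (List.replicate (n + 1) t0).getLast? = some t0 := by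
        rw [List.replicate_succ', List.getLast?_concat]
      rw [hlast]
      rw [List.count_map_of_injective doc (fun t => "has(" ++ t ++ ")") hk_inj t0]
      simp only [Option.map_some, Option.getD_some, PySem.Dict.getD_counter,
        PySem.Dict.getD_empty]
      rw [hn]
      push_cast
      ring
    · have hfilter : doc.filter (fun t => ("has(" ++ t ++ ")" : String) == x) = [] := by
        apply List.filter_eq_nil_iff.mpr
        intro t ht hc
        exact hex (List.mem_map.mpr ⟨t, ht, eq_of_beq hc⟩)
      rw [hfilter, List.count_eq_zero_of_not_mem hex]
      simp

-- ---- assembling the pair phase ----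
def fkey (doc : List String) (pq : Int × Int) : String :=
  "token_pair=" ++ PySem.List.pyGetD doc pq.1 "" ++ "__" ++ PySem.List.pyGetD doc pq.2 ""

theorem dict_insert_step (d : PySem.Dict String Int) (key : String) :
    (if d.contains key then d.insert key (d.getD key 0 + 1) else d.insert key 1)
      = d.insert key (d.getD key 0 + 1) := by
  by_cases h : d.contains key = true
  · rw [if_pos h]
  · rw [if_neg (by simp [h]), PySem.Dict.getD_of_not_contains d 0 (by simpa using h)]
    norm_num

theorem Aside_eq (doc : List String) (k : Int) (d0 : PySem.Dict String Int)
    (hk : 2 ≤ k) (hL : k ≤ (doc.length : Int)) :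
    (PySem.List.pyRange 0 ((doc.length : Int) - k + 1) 1).foldl (fun feats i =>
        (combo2 (PySem.List.slice doc (some i) (some (i + k)))).foldl (fun feats co =>
          if feats.contains ("token_pair=" ++ co.1 ++ "__" ++ co.2) then
            feats.insert ("token_pair=" ++ co.1 ++ "__" ++ co.2)
              (feats.getD ("token_pair=" ++ co.1 ++ "__" ++ co.2) 0 + 1)
          else feats.insert ("token_pair=" ++ co.1 ++ "__" ++ co.2) 1) feats) d0
      = ((pairsA (doc.length : Int) k).map (fkey doc)).foldl
          (fun d y => d.insert y (d.getD y 0 + 1)) d0 := by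
  rw [List.foldl_map]
  unfold pairsA
  rw [List.foldl_flatMap]
  apply PySem.List.foldl_congr_mem
  intro acc i hi
  have hib := PySem.List.mem_pyRange_one.mp hi
  have hwin : PySem.List.slice doc (some i) (some (i + k))
      = (PySem.List.pyRange i (i + k) 1).map (fun j => PySem.List.pyGetD doc j "") := by
    exact slice_window doc i k hib.1 (by omega) (by omega)
  rw [hwin, combo2_map, List.foldl_map]
  unfold winPairs
  apply PySem.List.foldl_congr_mem
  intro acc2 pq _
  exact dict_insert_step acc2 _

theorem Bside_phase1 (doc : List String) (k : Int) (d0 : PySem.Dict String Int) :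
    (PySem.List.pyRange 0 (k - 1) 1).foldl (fun feats a =>
        (PySem.List.pyRange (a + 1) k 1).foldl (fun feats b =>
          feats.insert
            ("token_pair=" ++ PySem.List.pyGetD doc a "" ++ "__" ++ PySem.List.pyGetD doc b "")
            (feats.getD
              ("token_pair=" ++ PySem.List.pyGetD doc a "" ++ "__" ++ PySem.List.pyGetD doc b "") 0
              + (min a ((doc.length : Int) - k) + 1))) feats) d0
      = ((phase1 (doc.length : Int) k).map (fun pw => (fkey doc pw.1, pw.2))).foldl
          (fun d kw => d.insert kw.1 (d.getD kw.1 0 + kw.2)) d0 := by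
  unfold phase1
  rw [List.map_flatMap, List.foldl_flatMap]
  apply PySem.List.foldl_congr_mem
  intro acc a _
  rw [List.map_map, List.foldl_map]
  rfl

theorem Bside_phase2 (doc : List String) (k : Int) (d1 : PySem.Dict String Int) :
    (PySem.List.pyRange k (doc.length : Int) 1).foldl (fun feats b =>
        (PySem.List.pyRange (b - k + 1) b 1).foldl (fun feats a =>
          feats.insert
            ("token_pair=" ++ PySem.List.pyGetD doc a "" ++ "__" ++ PySem.List.pyGetD doc b "")
            (feats.getD
              ("token_pair=" ++ PySem.List.pyGetD doc a "" ++ "__" ++ PySem.List.pyGetD doc b "") 0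
              + (min a ((doc.length : Int) - k) - (b - k + 1) + 1))) feats) d1
      = ((phase2 (doc.length : Int) k).map (fun pw => (fkey doc pw.1, pw.2))).foldl
          (fun d kw => d.insert kw.1 (d.getD kw.1 0 + kw.2)) d1 := by
  unfold phase2
  rw [List.map_flatMap, List.foldl_flatMap]
  apply PySem.List.foldl_congr_mem
  intro acc b _
  rw [List.map_map, List.foldl_map]
  rfl

theorem keys_update_eq (doc : List String) (k : Int) (s : PySem.Set String)
    (hk : 2 ≤ k) (hL : k ≤ (doc.length : Int)) :
    PySem.Set.update s ((pairsA (doc.length : Int) k).map (fkey doc))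
      = PySem.Set.update s
          ((((phase1 (doc.length : Int) k ++ phase2 (doc.length : Int) k)).map
            (fun pw => (fkey doc pw.1, pw.2))).map (fun kw => kw.1)) := by
  have hmm : (((phase1 (doc.length : Int) k ++ phase2 (doc.length : Int) k)).map
        (fun pw => (fkey doc pw.1, pw.2))).map (fun kw => kw.1)
      = ((opsB (doc.length : Int) k).map (fun pw => pw.1)).map (fkey doc) := by
    unfold opsB
    rw [List.map_map, List.map_map]
    rfl
  rw [hmm, set_update_eq_nkP, set_update_eq_nkP]
  congr 1
  have hP : ∀ (l : List String), nkP (fun y => s.contains y) l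
      = (nkP (fun _ => false) l).filter (fun y => !s.contains y) := by
    intro l
    have h2 := nkP_or_eq_filter l (fun y => s.contains y) (fun _ => false)
    have e : (fun x => s.contains x || (fun _ => false) x) = (fun y => s.contains y) := by
      funext y; simp
    rw [e] at h2
    exact h2
  rw [hP, hP]
  congr 1
  rw [nkP_map_dedup (fkey doc) (pairsA (doc.length : Int) k) (fun _ => false) (fun _ => false)
    (by simp)]
  rw [order_main (doc.length : Int) k hk hL]

theorem pair_dicts_eq (doc : List String) (k : Int) (d0 : PySem.Dict String Int)
    (hnd : d0.keys.Nodup) (hk : 2 ≤ k) (hL : k ≤ (doc.length : Int)) :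
    ((pairsA (doc.length : Int) k).map (fkey doc)).foldl
        (fun d y => d.insert y (d.getD y 0 + 1)) d0
      = (((phase1 (doc.length : Int) k ++ phase2 (doc.length : Int) k)).map
          (fun pw => (fkey doc pw.1, pw.2))).foldl
          (fun d kw => d.insert kw.1 (d.getD kw.1 0 + kw.2)) d0 := by
  apply dict_eq_of_keys_getD
  · exact PySem.Dict.nodup_keys_foldl_insert _ _ _ hnd
  · exact PySem.Dict.nodup_keys_foldl_insert_key _ (fun (kw : String × Int) => kw.1)
      (fun (d : PySem.Dict String Int) (kw : String × Int) => d.getD kw.1 0 + kw.2) _ hnd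
  · rw [PySem.Dict.keys_foldl_insert, PySem.Dict.keys_foldl_insert_key _
      (fun (kw : String × Int) => kw.1)
      (fun (d : PySem.Dict String Int) (kw : String × Int) => d.getD kw.1 0 + kw.2)]
    exact keys_update_eq doc k d0.keys hk hL
  · intro x
    rw [getD_applyOps]
    have hA := PySem.Dict.getD_foldl_insert_add_one
      ((pairsA (doc.length : Int) k).map (fkey doc)) d0 x
    rw [hA]
    congr 1
    have := count_transfer (opsB (doc.length : Int) k) (pairsA (doc.length : Int) k) (fkey doc)
      (nodup_opsB_fst (doc.length : Int) k hk) (count_pairsA (doc.length : Int) k hk hL) x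
    rw [this]
    rfl

theorem Aside_degenerate (doc : List String) (k : Int) (d0 : PySem.Dict String Int)
    (h1 : ¬(2 ≤ k ∧ k ≤ (doc.length : Int))) (h2 : ¬(k < 0 ∧ 2 ≤ (doc.length : Int) + k)) :
    (PySem.List.pyRange 0 ((doc.length : Int) - k + 1) 1).foldl (fun feats i =>
        (combo2 (PySem.List.slice doc (some i) (some (i + k)))).foldl (fun feats co =>
          if feats.contains ("token_pair=" ++ co.1 ++ "__" ++ co.2) then
            feats.insert ("token_pair=" ++ co.1 ++ "__" ++ co.2)
              (feats.getD ("token_pair=" ++ co.1 ++ "__" ++ co.2) 0 + 1)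
          else feats.insert ("token_pair=" ++ co.1 ++ "__" ++ co.2) 1) feats) d0 = d0 := by
  have hcongr : ∀ (acc : PySem.Dict String Int) i,
      i ∈ PySem.List.pyRange 0 ((doc.length : Int) - k + 1) 1 →
      (combo2 (PySem.List.slice doc (some i) (some (i + k)))).foldl (fun feats co =>
          if feats.contains ("token_pair=" ++ co.1 ++ "__" ++ co.2) then
            feats.insert ("token_pair=" ++ co.1 ++ "__" ++ co.2)
              (feats.getD ("token_pair=" ++ co.1 ++ "__" ++ co.2) 0 + 1)
          else feats.insert ("token_pair=" ++ co.1 ++ "__" ++ co.2) 1) acc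
        = (fun (acc : PySem.Dict String Int) (_ : Int) => acc) acc i := by
    intro acc i hi
    have hib := PySem.List.mem_pyRange_one.mp hi
    have hshort : (PySem.List.slice doc (some i) (some (i + k))).length ≤ 1 := by
      rw [PySem.List.length_slice]
      simp only [PySem.List.clampIdx]
      split_ifs <;> omega
    rw [combo2_eq_nil_of_short _ hshort, List.foldl_nil]
  rw [List.foldl_ext _ _ d0 hcongr]
  exact PySem.List.foldl_ignore _ _

-- ===== VERDICT (by name: the statement is the Claim_ definition above) =====
theorem token_feature_spec : Claim_unchanged_token_feature := by
  unfold Claim_unchanged_token_feature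
  intro doc k _
  unfold Spec_token_feature
  intro hnD
  unfold D_token_feature at hnD
  simp only [token_feature, token_feature_alt]
  rw [has_phase_eq doc]
  have hnd : ∀ (n p : Int),
      (((doc.foldl (fun d token =>
          d.insert ("has(" ++ token ++ ")")
            (d.getD ("has(" ++ token ++ ")") 0 + 1)) PySem.Dict.empty).insert
        "neg_words" n).insert "pos_words" p).keys.Nodup := by
    intro n p
    apply PySem.Dict.nodup_keys_insert
    apply PySem.Dict.nodup_keys_insert
    exact PySem.Dict.nodup_keys_foldl_insert_key doc (fun t => "has(" ++ t ++ ")") _ _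
      (by simp [PySem.Dict.nodup_keys_empty])
  by_cases hmain : 2 ≤ k ∧ k ≤ (doc.length : Int)
  · rw [if_pos hmain]
    apply congrArg PySem.Dict.items
    rw [Aside_eq doc k _ hmain.1 hmain.2, Bside_phase1 doc k, Bside_phase2 doc k,
      ← List.foldl_append, ← List.map_append]
    exact pair_dicts_eq doc k _ (hnd _ _) hmain.1 hmain.2
  · rw [if_neg hmain]
    apply congrArg PySem.Dict.items
    exact Aside_degenerate doc k _ hmain hnD

theorem token_feature_changed : Claim_changed_token_feature := by
  unfold Claim_changed_token_feature; decide
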